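-- pv_equiv track=rewrite | github.com/luizmedola/Exerc-cios-Senac- | ex52.py | soma_diagonais
-- ===== SOURCE A (Python) =====
-- def soma_diagonais(matriz):
--     soma = 0
--     n = len(matriz)
--
--     for i in range(n):
--
--         soma += matriz[i][i]
--
--         soma += matriz[i][n - 1 - i]
--
--     if n % 2 == 1:
--         soma -= matriz[n // 2][n // 2]
--
--     return soma
-- ===== SOURCE B (Python) =====
-- def soma_diagonais(matriz):
--     soma = 0
--     n = len(matriz)
--     for i in range(n):
--         for j in range(n):
--             if j == i or j == n - 1 - i:
--                 soma += matriz[i][j]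
--     return soma
-- ===== Notes on version B (the rewrite author's own statement) =====
-- stated objective: simpler
-- what changed: Replaces the diagonal-index loop plus explicit odd-center subtraction with a double loop over all cells that adds a cell exactly when its column lies on either diagonal, so the center is counted once naturally and the parity correction disappears.
import Mathlib
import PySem

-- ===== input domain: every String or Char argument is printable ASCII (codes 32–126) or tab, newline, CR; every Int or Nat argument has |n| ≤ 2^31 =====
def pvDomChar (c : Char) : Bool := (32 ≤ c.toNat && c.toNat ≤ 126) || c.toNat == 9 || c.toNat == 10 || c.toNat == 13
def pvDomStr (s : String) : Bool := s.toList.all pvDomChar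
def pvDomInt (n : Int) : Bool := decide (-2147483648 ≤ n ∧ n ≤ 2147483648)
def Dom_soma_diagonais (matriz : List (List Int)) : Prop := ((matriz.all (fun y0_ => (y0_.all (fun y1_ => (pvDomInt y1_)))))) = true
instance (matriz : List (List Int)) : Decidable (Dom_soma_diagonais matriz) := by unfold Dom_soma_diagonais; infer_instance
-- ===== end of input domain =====

-- B sums matriz[i][j] over a double loop exactly when j lies on a diagonal, dropping A's odd-center correction; simpler, same behaviour.


-- ===== PORT A =====
def soma_diagonais (matriz : List (List Int)) : Int :=
  let n : Int := matriz.length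
  let soma : Int :=
    (PySem.List.pyRange 0 n 1).foldl
      (fun soma i =>
        let soma := soma + PySem.List.pyGetD (PySem.List.pyGetD matriz i []) i 0
        soma + PySem.List.pyGetD (PySem.List.pyGetD matriz i []) (n - 1 - i) 0)
      0
  if PySem.Int.mod n 2 = 1 then
    soma - PySem.List.pyGetD (PySem.List.pyGetD matriz (PySem.Int.floordiv n 2) []) (PySem.Int.floordiv n 2) 0
  else
    soma

-- ===== PORT B =====
def soma_diagonais_alt (matriz : List (List Int)) : Int :=
  let n : Int := matriz.length
  (PySem.List.pyRange 0 n 1).foldl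
    (fun soma i =>
      (PySem.List.pyRange 0 n 1).foldl
        (fun soma j =>
          if j = i ∨ j = n - 1 - i then
            soma + PySem.List.pyGetD (PySem.List.pyGetD matriz i []) j 0
          else soma)
        soma)
    0

-- ===== PRECONDITION & SPEC =====
-- Pre_ is exactly the inputs where Python A returns (no IndexError): every row reaches both diagonal columns.
def Pre_soma_diagonais (matriz : List (List Int)) : Prop :=
  ((List.range matriz.length).all (fun i =>
    decide (i < (matriz.getD i []).length)
      && decide (matriz.length - 1 - i < (matriz.getD i []).length))) = true
instance (matriz : List (List Int)) : Decidable (Pre_soma_diagonais matriz) := by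
  unfold Pre_soma_diagonais; infer_instance
def pvWitness_soma_diagonais : List (List Int) := [[1, 2], [3, 4]]
def Spec_soma_diagonais (matriz : List (List Int)) (out : Int) : Prop := out = soma_diagonais_alt matriz
instance (matriz : List (List Int)) (out : Int) : Decidable (Spec_soma_diagonais matriz out) := by unfold Spec_soma_diagonais; infer_instance

-- ===== CLAIM (what is proved, stated in full; the proofs are below) =====
def Claim_equal_soma_diagonais : Prop := ∀ (matriz : List (List Int)), Dom_soma_diagonais matriz → Pre_soma_diagonais matriz → Spec_soma_diagonais matriz (soma_diagonais matriz)

-- ===== LEMMAS AND PROOFS =====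

theorem pv_sum_map_range (n : ℕ) (f : ℕ → Int) :
    ((List.range n).map f).sum = ∑ k ∈ Finset.range n, f k := by
  induction n with
  | zero => simp
  | succ n ih => simp [List.range_succ, Finset.sum_range_succ, ih]

-- The double-diagonal sum over one row, as B's inner loop computes it.
theorem pv_inner_sum (n k : ℕ) (hk : k < n) (f : ℕ → Int) :
    (∑ j ∈ Finset.range n, if j = k ∨ j = n - 1 - k then f j else 0)
      = f k + f (n - 1 - k) - (if k = n - 1 - k then f k else 0) := by
  by_cases h : k = n - 1 - k
  · rw [← h]
    simp [Finset.sum_ite_eq', hk]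
  · have hpt : ∀ j, (if j = k ∨ j = n - 1 - k then f j else 0)
        = (if j = k then f j else 0) + (if j = n - 1 - k then f j else 0) := by
      intro j
      rcases eq_or_ne j k with h1 | h1 <;> rcases eq_or_ne j (n - 1 - k) with h2 | h2
      · exact absurd (h1 ▸ h2) h
      · subst h1; simp [h]
      · subst h2
        simp [h1]
      · simp [h1, h2]
    rw [Finset.sum_congr rfl (fun j _ => hpt j), Finset.sum_add_distrib,
        Finset.sum_ite_eq', Finset.sum_ite_eq']
    have h2 : n - 1 - k < n := by omega
    simp [Finset.mem_range, hk, h2, h]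

theorem pv_center_sum (n : ℕ) (f : ℕ → Int) :
    (∑ k ∈ Finset.range n, if k = n - 1 - k then f k else 0)
      = if n % 2 = 1 then f (n / 2) else 0 := by
  have hcong : ∀ k ∈ Finset.range n,
      (if k = n - 1 - k then f k else 0) = (if n % 2 = 1 ∧ k = n / 2 then f k else 0) := by
    intro k hk
    rw [Finset.mem_range] at hk
    by_cases h : k = n - 1 - k
    · have h2 : n % 2 = 1 ∧ k = n / 2 := by omega
      rw [if_pos h, if_pos h2]
    · have h2 : ¬ (n % 2 = 1 ∧ k = n / 2) := by omega
      rw [if_neg h, if_neg h2]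
  rw [Finset.sum_congr rfl hcong]
  by_cases hp : n % 2 = 1
  · have hn : 0 < n := by omega
    simp [hp, Finset.sum_ite_eq', Finset.mem_range, Nat.div_lt_self hn]
  · simp [hp]

-- The whole identity, for an arbitrary cell-access function g.
theorem pv_main (n : ℕ) (g : Int → Int → Int) :
    (if PySem.Int.mod (n : Int) 2 = 1 then
        ((PySem.List.pyRange 0 (n : Int) 1).foldl
            (fun soma i => soma + g i i + g i ((n : Int) - 1 - i)) 0)
          - g (PySem.Int.floordiv (n : Int) 2) (PySem.Int.floordiv (n : Int) 2)
      else
        (PySem.List.pyRange 0 (n : Int) 1).foldl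
            (fun soma i => soma + g i i + g i ((n : Int) - 1 - i)) 0)
    = (PySem.List.pyRange 0 (n : Int) 1).foldl
        (fun soma i =>
          (PySem.List.pyRange 0 (n : Int) 1).foldl
            (fun soma j => if j = i ∨ j = (n : Int) - 1 - i then soma + g i j else soma)
            soma)
        0 := by
  have hsub : ∀ k : ℕ, k < n → (n : Int) - 1 - (k : Int) = ((n - 1 - k : ℕ) : Int) := by
    intro k hk; omega
  have hA : (PySem.List.pyRange 0 (n : Int) 1).foldl
        (fun soma i => soma + g i i + g i ((n : Int) - 1 - i)) 0
      = ∑ k ∈ Finset.range n, (g k k + g k ((n : Int) - 1 - (k : Int))) := by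
    have h1 : (fun (soma i : Int) => soma + g i i + g i ((n : Int) - 1 - i))
        = fun soma i => soma + (g i i + g i ((n : Int) - 1 - i)) := by
      funext soma i; ring
    rw [h1, PySem.List.foldl_add, PySem.List.pyRange_one]
    simp [List.map_map, Function.comp, pv_sum_map_range]
  have hB : (PySem.List.pyRange 0 (n : Int) 1).foldl
        (fun soma i =>
          (PySem.List.pyRange 0 (n : Int) 1).foldl
            (fun soma j => if j = i ∨ j = (n : Int) - 1 - i then soma + g i j else soma)
            soma)
        0
      = ∑ k ∈ Finset.range n, ∑ j ∈ Finset.range n,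
          (if (j : Int) = (k : Int) ∨ (j : Int) = (n : Int) - 1 - (k : Int) then g k j else 0) := by
    have h2 : ∀ (i soma : Int),
        (PySem.List.pyRange 0 (n : Int) 1).foldl
          (fun soma j => if j = i ∨ j = (n : Int) - 1 - i then soma + g i j else soma) soma
        = soma + ((PySem.List.pyRange 0 (n : Int) 1).map
            (fun j => if j = i ∨ j = (n : Int) - 1 - i then g i j else 0)).sum := by
      intro i soma
      have h1 : (fun (soma j : Int) => if j = i ∨ j = (n : Int) - 1 - i then soma + g i j else soma)
          = fun soma j => soma + (if j = i ∨ j = (n : Int) - 1 - i then g i j else 0) := by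
        funext soma j; split_ifs <;> ring
      rw [h1, PySem.List.foldl_add]
    have h3 : (fun (soma i : Int) =>
          (PySem.List.pyRange 0 (n : Int) 1).foldl
            (fun soma j => if j = i ∨ j = (n : Int) - 1 - i then soma + g i j else soma)
            soma)
        = fun soma i => soma + ((PySem.List.pyRange 0 (n : Int) 1).map
            (fun j => if j = i ∨ j = (n : Int) - 1 - i then g i j else 0)).sum :=
      funext fun soma => funext fun i => h2 i soma
    rw [h3, PySem.List.foldl_add, PySem.List.pyRange_one]
    simp [List.map_map, Function.comp, pv_sum_map_range]
  rw [hA, hB]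
  have hstep : ∀ k ∈ Finset.range n,
      (∑ j ∈ Finset.range n,
          if (j : Int) = (k : Int) ∨ (j : Int) = (n : Int) - 1 - (k : Int) then g k j else 0)
      = g k k + g k ((n - 1 - k : ℕ) : Int) - (if k = n - 1 - k then g k k else 0) := by
    intro k hk
    rw [Finset.mem_range] at hk
    calc (∑ j ∈ Finset.range n,
            if (j : Int) = (k : Int) ∨ (j : Int) = (n : Int) - 1 - (k : Int) then g k j else 0)
        = ∑ j ∈ Finset.range n, (if j = k ∨ j = n - 1 - k then g (k : Int) (j : Int) else 0) :=
          Finset.sum_congr rfl (fun j _ => by rw [hsub k hk]; simp [Nat.cast_inj])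
      _ = _ := pv_inner_sum n k hk (fun j => g k j)
  rw [Finset.sum_congr rfl hstep, Finset.sum_sub_distrib,
      pv_center_sum n (fun k => g k k)]
  have hAc : (∑ k ∈ Finset.range n, (g k k + g k ((n : Int) - 1 - (k : Int))))
      = ∑ k ∈ Finset.range n, (g k k + g k ((n - 1 - k : ℕ) : Int)) :=
    Finset.sum_congr rfl (fun k hk => by rw [hsub k (Finset.mem_range.mp hk)])
  rw [hAc]
  have hm2 : PySem.Int.mod (n : Int) 2 = ((n % 2 : ℕ) : Int) := by
    exact_mod_cast PySem.Int.mod_natCast n 2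
  have hd2 : PySem.Int.floordiv (n : Int) 2 = ((n / 2 : ℕ) : Int) := by
    exact_mod_cast PySem.Int.floordiv_natCast n 2
  rw [hm2, hd2]
  by_cases hp : n % 2 = 1
  · rw [if_pos (by exact_mod_cast hp), if_pos hp]
  · rw [if_neg (by intro hh; exact hp (by exact_mod_cast hh)), if_neg hp]
    simp

-- ===== VERDICT (by name: the statement is the Claim_ definition above) =====
theorem soma_diagonais_spec : Claim_equal_soma_diagonais := by
  intro m _ _
  unfold Spec_soma_diagonais soma_diagonais soma_diagonais_alt
  exact pv_main m.length
    (fun i j => PySem.List.pyGetD (PySem.List.pyGetD m i []) j 0)
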